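-- pv_equiv track=rewrite | github.com/loki0b/intro-programming | 04-functions/221L4Q4.py | palavra_encontrada
-- ===== SOURCE A (Python) =====
-- def separar_silabas(palavra_a_ser_separada):
--     lista_silabas = []
--     silaba = ''
--     for letra in palavra_a_ser_separada:
--         if letra not in 'aeiou':
--             silaba += letra
--
--         else:
--             silaba += letra
--             lista_silabas.append(silaba)
--             silaba = ''
--
--     return lista_silabas
--
-- def palavra_encontrada(input_escolhido):
--     silabas_separadas = separar_silabas(input_escolhido)
--
--     lista_silabas_reais = ['shi', 'chi', 'ko', 'ku', 'ya', 'ma']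
--
--     silabas_encontradas = []
--     for silaba in silabas_separadas:
--         for silaba_real in lista_silabas_reais:
--             if silaba_real == silaba:
--                 silabas_encontradas.append(silaba)
--
--     return silabas_encontradas
-- ===== SOURCE B (Python) =====
-- def palavra_encontrada(input_escolhido):
--     allowed = ('shi', 'chi', 'ko', 'ku', 'ya', 'ma')
--     encontradas = []
--     inicio = 0
--     for i, letra in enumerate(input_escolhido):
--         if letra in 'aeiou':
--             silaba = input_escolhido[inicio:i + 1]
--             if silaba in allowed:
--                 encontradas.append(silaba)
--             inicio = i + 1
--     return encontradas
-- ===== Notes on version B (the rewrite author's own statement) =====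
-- stated objective: alternative
-- what changed: Replaces A's two-phase design (character-accumulator loop building every syllable, then a nested 6-way equality scan over them) with a single enumerate pass that slices each syllable out of the string at vowel positions and filters it inline with one membership test.
import Mathlib
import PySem

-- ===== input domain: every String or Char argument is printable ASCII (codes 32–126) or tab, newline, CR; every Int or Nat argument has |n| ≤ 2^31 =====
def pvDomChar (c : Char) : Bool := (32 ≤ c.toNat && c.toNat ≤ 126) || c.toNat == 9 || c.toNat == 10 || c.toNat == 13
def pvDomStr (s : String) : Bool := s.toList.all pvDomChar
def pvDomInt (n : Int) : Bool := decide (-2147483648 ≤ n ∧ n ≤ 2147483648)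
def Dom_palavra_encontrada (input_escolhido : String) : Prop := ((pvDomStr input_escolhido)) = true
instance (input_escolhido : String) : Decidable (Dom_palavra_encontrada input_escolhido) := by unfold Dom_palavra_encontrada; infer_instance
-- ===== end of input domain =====

-- B replaces A's accumulator loop plus nested equality scan by one enumerate pass
-- slicing syllables out at vowel positions with an inline membership test (alternative).

-- ===== PORT A =====
-- the vowels of the membership test `letra in 'aeiou'`
def pvVowels : List Char := ['a', 'e', 'i', 'o', 'u']

-- the body of A's character loop: state = (lista_silabas, silaba)
def pvStepA (st : List String × List Char) (letra : Char) : List String × List Char :=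
  if (pvVowels.contains letra) = false then (st.1, st.2 ++ [letra])
  else (st.1 ++ [String.mk (st.2 ++ [letra])], [])

def separar_silabas (palavra_a_ser_separada : String) : List String :=
  (palavra_a_ser_separada.toList.foldl pvStepA ([], [])).1

def pvReais : List String := ["shi", "chi", "ko", "ku", "ya", "ma"]

def palavra_encontrada (input_escolhido : String) : List String :=
  let silabas_separadas := separar_silabas input_escolhido
  silabas_separadas.foldl
    (fun acc silaba =>
      pvReais.foldl (fun acc2 silaba_real =>
        if silaba_real == silaba then acc2 ++ [silaba] else acc2) acc)
    []

-- ===== PORT B =====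
-- the body of B's enumerate loop: state = (encontradas, inicio)
def pvStepB (cs : List Char) (st : List String × Int) (p : Int × Char) : List String × Int :=
  if pvVowels.contains p.2 then
    let silaba := String.mk (PySem.List.slice cs (some st.2) (some (p.1 + 1)))
    (if pvReais.contains silaba then st.1 ++ [silaba] else st.1, p.1 + 1)
  else st

def palavra_encontrada_alt (input_escolhido : String) : List String :=
  ((PySem.List.enumerate input_escolhido.toList 0).foldl
    (pvStepB input_escolhido.toList) ([], 0)).1

-- ===== PRECONDITION & SPEC =====
def Spec_palavra_encontrada (input_escolhido : String) (out : List String) : Prop := out = palavra_encontrada_alt input_escolhido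
instance (input_escolhido : String) (out : List String) : Decidable (Spec_palavra_encontrada input_escolhido out) := by unfold Spec_palavra_encontrada; infer_instance

-- ===== CLAIM (what is proved, stated in full; the proofs are below) =====
def Claim_equal_palavra_encontrada : Prop := ∀ (input_escolhido : String), Dom_palavra_encontrada input_escolhido → Spec_palavra_encontrada input_escolhido (palavra_encontrada input_escolhido)

-- ===== LEMMAS AND PROOFS =====

-- forward-running syllable splitter: what both loops compute, parametrised by the pending prefix
def pvSylF (cur : List Char) : List Char → List (List Char)
  | [] => []
  | c :: cs =>
    if pvVowels.contains c then (cur ++ [c]) :: pvSylF [] cs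
    else pvSylF (cur ++ [c]) cs

theorem pvFoldA (cs : List Char) (acc : List String) (cur : List Char) :
    (cs.foldl pvStepA (acc, cur)).1 = acc ++ (pvSylF cur cs).map String.mk := by
  induction cs generalizing acc cur with
  | nil => simp [pvSylF]
  | cons c cs ih =>
    simp only [List.foldl, pvStepA, pvSylF]
    by_cases h : c ∈ pvVowels
    · simp [h, ih]
    · simp [h, ih]

theorem pvInner_not (rs : List String) (s : String) (acc : List String) (h : s ∉ rs) :
    rs.foldl (fun acc2 r => if r == s then acc2 ++ [s] else acc2) acc = acc := by
  induction rs generalizing acc with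
  | nil => rfl
  | cons r rs ih =>
    simp only [List.mem_cons, not_or] at h
    simp only [List.foldl]
    rw [if_neg (by simp; exact fun hh => h.1 hh.symm), ih _ h.2]

theorem pvInner (rs : List String) (hnd : rs.Nodup) (s : String) (acc : List String) :
    rs.foldl (fun acc2 r => if r == s then acc2 ++ [s] else acc2) acc
      = acc ++ (if rs.contains s then [s] else []) := by
  induction rs generalizing acc with
  | nil => simp
  | cons r rs ih =>
    simp only [List.nodup_cons] at hnd
    simp only [List.foldl]
    by_cases h : r = s
    · subst h
      rw [if_pos (by simp), pvInner_not _ _ _ hnd.1]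
      simp
    · rw [if_neg (by simp [h]), ih hnd.2]
      simp [List.contains_cons, h, Ne.symm h]

theorem pvOuter (sil : List String) (acc : List String) :
    sil.foldl
      (fun acc silaba =>
        pvReais.foldl (fun acc2 silaba_real =>
          if silaba_real == silaba then acc2 ++ [silaba] else acc2) acc)
      acc
    = acc ++ sil.filter (fun s => pvReais.contains s) := by
  induction sil generalizing acc with
  | nil => simp
  | cons x sil ih =>
    simp only [List.foldl]
    rw [pvInner pvReais (by decide) x acc, ih]
    by_cases h : x ∈ pvReais
    · simp [h, List.filter_cons]
    · simp [h, List.filter_cons]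

-- taking one more element past a completed prefix
theorem pvTakeLem (l₁ : List Char) (c : Char) (l₂ : List Char) :
    (l₁ ++ c :: l₂).take (l₁.length + 1) = l₁ ++ [c] := by
  induction l₁ with
  | nil => simp
  | cons x xs ih => simp [List.take, ih]

-- invariant of B's enumerate loop
theorem pvFoldB (cs : List Char) (rest : List Char) :
    ∀ (done : List Char) (acc : List String) (start : Nat),
    cs = done ++ rest → start ≤ done.length →
    ((PySem.List.enumerate rest (done.length : Int)).foldl (pvStepB cs) (acc, (start : Int))).1
      = acc ++ ((pvSylF (done.drop start) rest).map String.mk).filter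
                 (fun s => pvReais.contains s) := by
  induction rest with
  | nil => intro done acc start _ _; simp [PySem.List.enumerate_nil, pvSylF]
  | cons c rest ih =>
    intro done acc start hcs hstart
    rw [PySem.List.enumerate_cons, List.foldl_cons]
    simp only [pvStepB, pvSylF]
    by_cases h : c ∈ pvVowels
    · simp only [h, List.contains_iff_mem, decide_true, if_true]
      have hslice : PySem.List.slice cs (some (start : Int)) (some ((done.length : Int) + 1))
          = done.drop start ++ [c] := by
        have : ((done.length : Int) + 1) = ((done.length + 1 : Nat) : Int) := by push_cast; ring
        rw [this, PySem.List.slice_natCast, hcs,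
            List.drop_append_of_le_length hstart]
        have hlen : done.length + 1 - start = (done.drop start).length + 1 := by
          simp [List.length_drop]; omega
        rw [hlen, pvTakeLem]
      have hstep : ((done.length : Int) + 1) = (((done ++ [c]).length : Nat) : Int) := by
        simp
      rw [hslice, hstep, ih (done ++ [c]) _ (done ++ [c]).length (by simp [hcs]) le_rfl]
      simp only [List.drop_length]
      by_cases hall : String.mk (done.drop start ++ [c]) ∈ pvReais
      · simp [hall, List.filter_cons]
      · simp [hall, List.filter_cons]
    · simp only [h, List.contains_iff_mem, decide_false, Bool.false_eq_true, if_false]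
      have hstep : (done.length : Int) + 1 = (((done ++ [c]).length : Nat) : Int) := by
        simp
      rw [hstep, ih (done ++ [c]) acc start (by simp [hcs]) (by simp; omega)]
      rw [List.drop_append_of_le_length hstart]

-- ===== VERDICT (by name: the statement is the Claim_ definition above) =====
theorem palavra_encontrada_spec : Claim_equal_palavra_encontrada := by
  intro s _
  unfold Spec_palavra_encontrada palavra_encontrada palavra_encontrada_alt separar_silabas
  rw [pvFoldA, pvOuter]
  have := pvFoldB s.toList s.toList [] [] 0 (by simp) (by simp)
  simp only [List.length_nil, Int.natCast_zero, List.drop_nil] at this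
  rw [this]
  simp
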